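-- pv_equiv track=rewrite | github.com/ThrizTar/Code-homework-python | Homework&Lab DS Programming/Homework/HW12_1/HW12_1_630510609.py | nth_term
-- ===== SOURCE A (Python) =====
-- def nth_term(n):
--     # set variable
--     result = 0
--     i = 0
--
--     # loop until n less than or equal 0
--     while n > 0:
--         # 2 evenly divided, last is 7
--         if n % 2 == 0:
--             result += 7 * (10**i)
--             n = (n//2) - 1
--         # 2 not evenly divided, last is 6
--         else:
--             result += 6 * (10**i)
--             n = n//2
--         i += 1
--     return result
-- ===== SOURCE B (Python) =====
-- def nth_term(n):
--     # recursive digit generation: last digit is 7 when n is even, 6 when odd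
--     if n <= 0:
--         return 0
--     if n % 2 == 0:
--         return 7 + 10 * nth_term((n // 2) - 1)
--     return 6 + 10 * nth_term(n // 2)
-- ===== Notes on version B (the rewrite author's own statement) =====
-- stated objective: alternative
-- what changed: Replaced the accumulator loop with explicit powers of ten by a direct recursion that builds the number as digit + 10*rest.
import Mathlib
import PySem

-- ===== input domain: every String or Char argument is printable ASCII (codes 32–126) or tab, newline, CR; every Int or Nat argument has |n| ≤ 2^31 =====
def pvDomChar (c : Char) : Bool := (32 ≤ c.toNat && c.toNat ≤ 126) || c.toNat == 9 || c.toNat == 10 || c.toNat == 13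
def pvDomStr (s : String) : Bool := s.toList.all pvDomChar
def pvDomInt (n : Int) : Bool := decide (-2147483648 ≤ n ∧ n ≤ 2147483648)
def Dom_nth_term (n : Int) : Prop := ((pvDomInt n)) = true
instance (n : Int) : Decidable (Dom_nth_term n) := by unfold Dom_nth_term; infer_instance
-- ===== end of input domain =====

-- B replaces the accumulator loop with explicit powers of ten by a direct recursion
-- building the number as digit + 10 * rest; same cost, different decomposition.

-- ===== PORT A =====
-- the while loop, state (n, result, i)
def nth_term_loop (n result : Int) (i : Nat) : Int :=
  if _h : n > 0 then
    if PySem.Int.mod n 2 == 0 then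
      nth_term_loop (PySem.Int.floordiv n 2 - 1) (result + 7 * 10 ^ i) (i + 1)
    else
      nth_term_loop (PySem.Int.floordiv n 2) (result + 6 * 10 ^ i) (i + 1)
  else result
termination_by n.toNat
decreasing_by
  all_goals
    have := PySem.Int.floordiv_eq_ediv_of_pos (a := n) (b := 2) (by omega)
    omega

def nth_term (n : Int) : Int := nth_term_loop n 0 0

-- ===== PORT B =====
def nth_term_alt (n : Int) : Int :=
  if _h : n ≤ 0 then 0
  else if PySem.Int.mod n 2 == 0 then
    7 + 10 * nth_term_alt (PySem.Int.floordiv n 2 - 1)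
  else
    6 + 10 * nth_term_alt (PySem.Int.floordiv n 2)
termination_by n.toNat
decreasing_by
  all_goals
    have := PySem.Int.floordiv_eq_ediv_of_pos (a := n) (b := 2) (by omega)
    omega

-- ===== PRECONDITION & SPEC =====
def Spec_nth_term (n : Int) (out : Int) : Prop := out = nth_term_alt n
instance (n : Int) (out : Int) : Decidable (Spec_nth_term n out) := by unfold Spec_nth_term; infer_instance

-- ===== CLAIM (what is proved, stated in full; the proofs are below) =====
def Claim_equal_nth_term : Prop := ∀ (n : Int), Dom_nth_term n → Spec_nth_term n (nth_term n)

-- ===== LEMMAS AND PROOFS =====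

-- ===== VERDICT (by name: the statement is the Claim_ definition above) =====
-- loop invariant: the loop returns result + 10^i * (recursive value of n)
theorem nth_term_loop_inv (n result : Int) (i : Nat) :
    nth_term_loop n result i = result + 10 ^ i * nth_term_alt n := by
  induction n, result, i using nth_term_loop.induct with
  | case1 n result i h he ih =>
    rw [nth_term_loop, nth_term_alt]
    simp only [dif_pos h, if_pos he, dif_neg (by omega : ¬ n ≤ 0), ih]
    ring
  | case2 n result i h he ih =>
    rw [nth_term_loop, nth_term_alt]
    simp only [dif_pos h, if_neg he, dif_neg (by omega : ¬ n ≤ 0), ih]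
    ring
  | case3 n result i h =>
    rw [nth_term_loop, nth_term_alt]
    simp only [dif_neg h, dif_pos (by omega : n ≤ 0)]
    ring

theorem nth_term_spec : Claim_equal_nth_term := by
  intro n _
  unfold Spec_nth_term nth_term
  rw [nth_term_loop_inv]
  ring
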